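-- pv_equiv track=rewrite | github.com/waikato-datamining/seppl | src/seppl/_args.py | is_help_requested
-- ===== SOURCE A (Python) =====
-- from typing import List, Dict, Tuple, Iterable, Set, Optional
--
-- def is_help_requested(args: List[str]) -> Tuple[bool, bool, str]:
--     """
--     Checks whether help was requested.
--
--     :param args: the arguments to check
--     :type args: list
--     :return: the tuple of help requested: (help_requested, plugin_details, plugin_name)
--     :rtype: tuple
--     """
--     help_requested = False
--     plugin_details = False
--     plugin_name = None
--     for index, arg in enumerate(args):
--         if (arg == "-h") or (arg == "--help"):
--             help_requested = True
--             break
--         if arg == "--help-all":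
--             help_requested = True
--             plugin_details = True
--             break
--         if arg == "--help-plugin":
--             help_requested = True
--             if index < len(args) - 1:
--                 plugin_name = args[index + 1]
--             break
--     return help_requested, plugin_details, plugin_name
-- ===== SOURCE B (Python) =====
-- def _first_index(args, flag):
--     try:
--         return args.index(flag)
--     except ValueError:
--         return len(args)
--
--
-- def is_help_requested(args):
--     n = len(args)
--     i_basic = min(_first_index(args, "-h"), _first_index(args, "--help"))
--     i_all = _first_index(args, "--help-all")
--     i_plugin = _first_index(args, "--help-plugin")
--     m = min(i_basic, i_all, i_plugin)
--     if m == n: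
--         return False, False, None
--     if m == i_basic:
--         return True, False, None
--     if m == i_all:
--         return True, True, None
--     return True, False, (args[m + 1] if m + 1 < n else None)
-- ===== Notes on version B (the rewrite author's own statement) =====
-- stated objective: alternative
-- what changed: B replaces A's single break-laden scan with four independent list.index searches (one per flag), takes the arithmetic minimum of the hit positions, and classifies the winner; correctness rests on distinct flag strings never sharing an index, so the minimum uniquely identifies the first help flag.
import Mathlib
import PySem

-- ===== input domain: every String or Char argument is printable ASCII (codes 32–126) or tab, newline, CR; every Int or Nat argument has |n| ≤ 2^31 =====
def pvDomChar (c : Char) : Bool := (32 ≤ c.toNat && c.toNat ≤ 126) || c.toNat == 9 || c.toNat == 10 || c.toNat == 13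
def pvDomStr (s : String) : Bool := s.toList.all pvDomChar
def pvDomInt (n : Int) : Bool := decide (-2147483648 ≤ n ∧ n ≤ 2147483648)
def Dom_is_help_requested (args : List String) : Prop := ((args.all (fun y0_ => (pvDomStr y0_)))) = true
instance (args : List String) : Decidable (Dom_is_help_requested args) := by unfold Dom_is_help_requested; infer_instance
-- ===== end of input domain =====

-- B replaces A's single break-laden scan with four independent index searches whose minimum is then classified; same O(n) cost, different decomposition.

-- ===== PORT A =====
-- A's for-loop over enumerate(args) with break: structural recursion over the enumerated list.
def isHelpLoopA (args : List String) : List (Int × String) → Bool × Bool × Option String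
  | [] => (false, false, none)
  | (index, arg) :: rest =>
    if arg = "-h" ∨ arg = "--help" then (true, false, none)
    else if arg = "--help-all" then (true, true, none)
    else if arg = "--help-plugin" then
      (true, false,
        if index < (args.length : Int) - 1 then PySem.List.pyGet? args (index + 1) else none)
    else isHelpLoopA args rest

def is_help_requested (args : List String) : Bool × Bool × Option String :=
  isHelpLoopA args (PySem.List.enumerate args)

-- ===== PORT B =====
-- Source B's _first_index: args.index(flag), with ValueError mapped to len(args).
def firstIndexB (args : List String) (flag : String) : Nat :=
  (PySem.List.index? args flag).getD args.length

def is_help_requested_alt (args : List String) : Bool × Bool × Option String :=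
  let n := args.length
  let iBasic := min (firstIndexB args "-h") (firstIndexB args "--help")
  let iAll := firstIndexB args "--help-all"
  let iPlugin := firstIndexB args "--help-plugin"
  let m := min (min iBasic iAll) iPlugin
  if m = n then (false, false, none)
  else if m = iBasic then (true, false, none)
  else if m = iAll then (true, true, none)
  else (true, false, if m + 1 < n then PySem.List.pyGet? args ((m : Int) + 1) else none)

-- ===== PRECONDITION & SPEC =====
def Spec_is_help_requested (args : List String) (out : Bool × Bool × Option String) : Prop := out = is_help_requested_alt args
instance (args : List String) (out : Bool × Bool × Option String) : Decidable (Spec_is_help_requested args out) := by unfold Spec_is_help_requested; infer_instance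

-- ===== CLAIM =====
def Claim_equal_is_help_requested : Prop := ∀ (args : List String), Dom_is_help_requested args → Spec_is_help_requested args (is_help_requested args)

-- ===== LEMMAS AND PROOFS =====

-- Common reference shape: the first-match scan phrased as plain structural recursion.
def scanH : List String → Bool × Bool × Option String
  | [] => (false, false, none)
  | a :: rest =>
    if a = "-h" ∨ a = "--help" then (true, false, none)
    else if a = "--help-all" then (true, true, none)
    else if a = "--help-plugin" then (true, false, rest.head?)
    else scanH rest

theorem firstIndexB_cons (a : String) (rest : List String) (f : String) :
    firstIndexB (a :: rest) f = if a = f then 0 else firstIndexB rest f + 1 := by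
  simp only [firstIndexB, PySem.List.index?_eq_idxOf?, List.idxOf?_cons, List.length_cons,
    beq_iff_eq]
  by_cases h : a = f
  · simp [h]
  · simp only [if_neg h]
    cases List.idxOf? f rest <;> simp

theorem alt_eq_scanH (args : List String) : is_help_requested_alt args = scanH args := by
  induction args with
  | nil => simp [is_help_requested_alt, firstIndexB, PySem.List.index?_eq_idxOf?, scanH]
  | cons a rest ih =>
    rw [scanH]
    by_cases h1 : a = "-h"
    · subst h1
      simp [is_help_requested_alt, firstIndexB_cons]
    · by_cases h2 : a = "--help"
      · subst h2
        simp [is_help_requested_alt, firstIndexB_cons]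
      · by_cases h3 : a = "--help-all"
        · subst h3
          simp [is_help_requested_alt, firstIndexB_cons]
        · by_cases h4 : a = "--help-plugin"
          · subst h4
            simp [is_help_requested_alt, firstIndexB_cons]
            cases rest with
            | nil => simp
            | cons b t => simp [PySem.List.pyGet?, PySem.List.pyIdx?]
          · simp only [is_help_requested_alt, firstIndexB_cons,
              List.length_cons, h1, h2, h3, h4, or_self, if_false]
            rw [← ih]; simp only [is_help_requested_alt]
            generalize firstIndexB rest "-h" = x
            generalize firstIndexB rest "--help" = y
            generalize firstIndexB rest "--help-all" = z
            generalize firstIndexB rest "--help-plugin" = w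
            have hM : min (min (min (x+1) (y+1)) (z+1)) (w+1) = min (min (min x y) z) w + 1 := by
              omega
            rw [hM]
            set M := min (min (min x y) z) w with hMdef
            have hcast : ((M + 1 : Nat) : Int) + 1 = ((M + 2 : Nat) : Int) := by push_cast; ring
            split_ifs <;> (try rfl) <;> (try omega)
            · have h2c : ((M : Nat) : Int) + 1 = ((M + 1 : Nat) : Int) := by push_cast; ring
              rw [hcast, PySem.List.pyGet?_natCast, h2c, PySem.List.pyGet?_natCast]
              simp [List.getElem?_cons_succ]

theorem A_gen (args : List String) (suffix : List String) (k : Nat)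
    (hlen : args.length = k + suffix.length)
    (hget : ∀ j : Nat, args[k + j]? = suffix[j]?) :
    isHelpLoopA args (PySem.List.enumerate suffix (k : Int)) = scanH suffix := by
  induction suffix generalizing k with
  | nil => simp [PySem.List.enumerate_nil, isHelpLoopA, scanH]
  | cons a rest ih =>
    rw [PySem.List.enumerate_cons]
    rw [isHelpLoopA, scanH]
    by_cases h1 : a = "-h" ∨ a = "--help"
    · simp [h1]
    · simp only [if_neg h1]
      by_cases h2 : a = "--help-all"
      · simp [h2]
      · simp only [if_neg h2]
        by_cases h3 : a = "--help-plugin"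
        · simp only [if_pos h3]
          simp only [List.length_cons] at hlen
          cases rest with
          | nil =>
            simp only [List.length_nil] at hlen
            have hc : ¬ ((k : Int) < (args.length : Int) - 1) := by omega
            simp [hc]
          | cons b t =>
            have hc : (k : Int) < (args.length : Int) - 1 := by
              simp only [List.length_cons] at hlen; omega
            have hcast : (k : Int) + 1 = ((k + 1 : Nat) : Int) := by push_cast; ring
            have hg := hget 1
            simp only [if_pos hc, hcast, PySem.List.pyGet?_natCast]
            simp only [List.getElem?_cons_succ, List.getElem?_cons_zero] at hg
            simp [hg]
        · simp only [if_neg h3]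
          have hcast : (k : Int) + 1 = ((k + 1 : Nat) : Int) := by push_cast; ring
          rw [hcast]
          apply ih
          · simp only [List.length_cons] at hlen; omega
          · intro j
            have := hget (1 + j)
            simpa [Nat.add_comm, Nat.add_assoc, Nat.add_left_comm] using this

-- ===== VERDICT =====
theorem is_help_requested_spec : Claim_equal_is_help_requested := by
  intro args _
  unfold Spec_is_help_requested is_help_requested
  rw [alt_eq_scanH]
  have h := A_gen args args 0 (by simp) (fun j => by simp)
  simpa using h
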